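-- pv_equiv track=rewrite | github.com/ratnesh2507/Basic | pop.py | count_enchanting_paths
-- ===== SOURCE A (Python) =====
-- from math import comb, factorial
--
-- MOD = 10**9 + 7
--
-- def count_enchanting_paths(N):
--     if N == 1:
--         return 2
--     elif N == 2:
--         return 3
--     def nCr(n, r):
--         return factorial(n) // (factorial(r) * factorial(n - r))
--     totalpaths = 0
--     for i in range(N // 2 + 1, N + 1):
--         gold = nCr(N, i)
--         silver = nCr(i + min(i - 1, N - i), i)
--         totalpaths += (gold * silver) % MOD
--     return totalpaths % MOD
-- ===== SOURCE B (Python) =====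
-- MOD = 10**9 + 7
--
-- def count_enchanting_paths(N):
--     # In A's loop i >= N//2 + 1, so min(i-1, N-i) = N-i and silver = C(N, i) = gold:
--     # each term is C(N, i)**2 % MOD.  Maintain c = C(N, i) by a multiplicative update
--     # while walking the range downward from i = N, instead of recomputing factorials.
--     if N == 1:
--         return 2
--     if N == 2:
--         return 3
--     total = 0
--     c = 1  # C(N, N)
--     for i in range(N, N // 2, -1):
--         total = (total + c * c) % MOD
--         c = c * i // (N - i + 1)
--     return total
-- ===== Notes on version B (the rewrite author's own statement) =====
-- stated objective: faster
-- what changed: B notes that in A's loop min(i-1,N-i)=N-i so both binomials equal C(N,i), and maintains C(N,i) by a multiplicative update while walking the range downward, replacing per-term factorial computations.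
import Mathlib
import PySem

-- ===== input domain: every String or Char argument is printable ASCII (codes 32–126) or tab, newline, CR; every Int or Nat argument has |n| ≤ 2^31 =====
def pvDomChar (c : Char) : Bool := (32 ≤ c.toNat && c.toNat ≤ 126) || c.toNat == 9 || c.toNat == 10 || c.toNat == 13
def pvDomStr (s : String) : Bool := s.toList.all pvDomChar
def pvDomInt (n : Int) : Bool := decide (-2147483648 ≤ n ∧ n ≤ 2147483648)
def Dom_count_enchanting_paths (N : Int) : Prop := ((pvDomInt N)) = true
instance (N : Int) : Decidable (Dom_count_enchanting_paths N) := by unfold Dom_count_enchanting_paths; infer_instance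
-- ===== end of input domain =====

-- B replaces A's per-term factorial-quotient binomials (and the second, redundant binomial)
-- by a single multiplicatively updated C(N,i) walked down the range; measured faster (asymptotic).

def pvMOD : Int := 1000000007

-- ===== PORT A =====
-- math.factorial; exact for n ≥ 0, the only arguments A's execution reaches
def pyFactorial (n : Int) : Int := ((Nat.factorial n.toNat : Nat) : Int)

-- A's inner nCr helper
def nCrA (n r : Int) : Int :=
  PySem.Int.floordiv (pyFactorial n) (pyFactorial r * pyFactorial (n - r))

def count_enchanting_paths (N : Int) : Int :=
  if N = 1 then 2
  else if N = 2 then 3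
  else
    let totalpaths :=
      (PySem.List.pyRange (PySem.Int.floordiv N 2 + 1) (N + 1) 1).foldl
        (fun totalpaths i =>
          let gold := nCrA N i
          let silver := nCrA (i + min (i - 1) (N - i)) i
          totalpaths + PySem.Int.mod (gold * silver) pvMOD) 0
    PySem.Int.mod totalpaths pvMOD

-- ===== PORT B =====
def count_enchanting_paths_alt (N : Int) : Int :=
  if N = 1 then 2
  else if N = 2 then 3
  else
    ((PySem.List.pyRange N (PySem.Int.floordiv N 2) (-1)).foldl
      (fun st i =>
        (PySem.Int.mod (st.1 + st.2 * st.2) pvMOD,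
         PySem.Int.floordiv (st.2 * i) (N - i + 1)))
      ((0 : Int), (1 : Int))).1

-- ===== PRECONDITION & SPEC =====
def Spec_count_enchanting_paths (N : Int) (out : Int) : Prop := out = count_enchanting_paths_alt N
instance (N : Int) (out : Int) : Decidable (Spec_count_enchanting_paths N out) := by unfold Spec_count_enchanting_paths; infer_instance

-- ===== CLAIM (what is proved, stated in full; the proofs are below) =====
def Claim_equal_count_enchanting_paths : Prop := ∀ (N : Int), Dom_count_enchanting_paths N → Spec_count_enchanting_paths N (count_enchanting_paths N)

-- ===== LEMMAS AND PROOFS =====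

-- C(N, j) as the ports see it, cast to Int
def pvC (N j : Int) : Int := ((N.toNat.choose j.toNat : Nat) : Int)

lemma pv_nCrA_eq (n r : Int) (h0 : 0 ≤ r) (h1 : r ≤ n) : nCrA n r = pvC n r := by
  have hle : r.toNat ≤ n.toNat := by omega
  have hsub : (n - r).toNat = n.toNat - r.toNat := by omega
  have hfac : pyFactorial n = pvC n r * (pyFactorial r * pyFactorial (n - r)) := by
    simp only [pyFactorial, pvC, hsub]
    rw [← Nat.cast_mul, ← Nat.cast_mul]
    congr 1
    rw [← Nat.choose_mul_factorial_mul_factorial hle]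
    ring
  have hpos : (0 : Int) < pyFactorial r * pyFactorial (n - r) :=
    mul_pos (by simp only [pyFactorial]; exact_mod_cast Nat.factorial_pos r.toNat)
            (by simp only [pyFactorial]; exact_mod_cast Nat.factorial_pos (n - r).toNat)
  rw [nCrA, PySem.Int.floordiv_eq_ediv_of_pos hpos, hfac,
    Int.mul_ediv_cancel _ (ne_of_gt hpos)]

-- the multiplicative downward update:  C(N,j)*j // (N-j+1) = C(N,j-1)
lemma pv_step (N j : Int) (h1 : 1 ≤ j) (hj : j ≤ N) :
    PySem.Int.floordiv (pvC N j * j) (N - j + 1) = pvC N (j - 1) := by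
  have hk : j.toNat = (j.toNat - 1) + 1 := by omega
  have hrec := Nat.choose_succ_right_eq N.toNat (j.toNat - 1)
  rw [← hk] at hrec
  have hmul : pvC N j * j = pvC N (j - 1) * (N - j + 1) := by
    have h2 : (j - 1).toNat = j.toNat - 1 := by omega
    have hle : j.toNat - 1 ≤ N.toNat := by omega
    zify [hle, (by omega : 1 ≤ j.toNat)] at hrec
    have e1 : (j.toNat : Int) = j := by omega
    have e2 : (N.toNat : Int) = N := by omega
    rw [e1, e2] at hrec
    rw [pvC, pvC, h2]
    linear_combination hrec
  have hpos : (0 : Int) < N - j + 1 := by omega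
  rw [PySem.Int.floordiv_eq_ediv_of_pos hpos, hmul,
    Int.mul_ediv_cancel _ (by omega)]

-- B's loop, downward from i with the invariant c = C(N,i)
lemma pv_bloop (N L : Int) (hL : 0 ≤ L) :
    ∀ (k : Nat) (i : Int), (i - L).toNat = k → L ≤ i → i ≤ N →
    ∀ t : Int, PySem.Int.mod t pvMOD = t →
    ((PySem.List.pyRange i L (-1)).foldl
        (fun st x =>
          (PySem.Int.mod (st.1 + st.2 * st.2) pvMOD,
           PySem.Int.floordiv (st.2 * x) (N - x + 1)))
        (t, pvC N i)).1
      = PySem.Int.mod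
          (t + ((PySem.List.pyRange i L (-1)).map (fun j => pvC N j * pvC N j)).sum) pvMOD := by
  intro k
  induction k with
  | zero =>
      intro i hk hLi hiN t ht
      have hiL : i ≤ L := by omega
      rw [PySem.List.pyRange_neg_one_eq_nil hiL]
      simpa using ht.symm
  | succ m ih =>
      intro i hk hLi hiN t ht
      have hLi' : L < i := by omega
      rw [PySem.List.pyRange_neg_one_cons hLi']
      simp only [List.foldl_cons, List.map_cons, List.sum_cons]
      rw [pv_step N i (by omega) hiN]
      have hMpos : (0 : Int) < pvMOD := by norm_num [pvMOD]
      have ht' : PySem.Int.mod (PySem.Int.mod (t + pvC N i * pvC N i) pvMOD) pvMOD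
          = PySem.Int.mod (t + pvC N i * pvC N i) pvMOD := by
        rw [PySem.Int.mod_eq_emod_of_pos hMpos, PySem.Int.mod_eq_emod_of_pos hMpos,
          Int.emod_emod_of_dvd _ dvd_rfl]
      rw [ih (i - 1) (by omega) (by omega) (by omega) _ ht']
      simp only [PySem.Int.mod_eq_emod_of_pos hMpos, Int.emod_add_emod]
      ring_nf

theorem count_enchanting_paths_spec : Claim_equal_count_enchanting_paths := by
  intro N _
  unfold Spec_count_enchanting_paths count_enchanting_paths count_enchanting_paths_alt
  by_cases h1 : N = 1
  · simp [h1]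
  by_cases h2 : N = 2
  · simp [h2]
  simp only [if_neg h1, if_neg h2]
  have hMpos : (0 : Int) < pvMOD := by norm_num [pvMOD]
  have hfd : PySem.Int.floordiv N 2 = N / 2 :=
    PySem.Int.floordiv_eq_ediv_of_pos (by norm_num)
  by_cases h3 : N ≤ 0
  · -- both loops are empty; A returns 0 % MOD = 0, B returns 0
    have hA : PySem.List.pyRange (PySem.Int.floordiv N 2 + 1) (N + 1) 1 = [] := by
      apply PySem.List.pyRange_one_eq_nil; rw [hfd]; omega
    have hB : PySem.List.pyRange N (PySem.Int.floordiv N 2) (-1) = [] := by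
      apply PySem.List.pyRange_neg_one_eq_nil; rw [hfd]; omega
    rw [hA, hB]
    simp [PySem.Int.mod_eq_emod_of_pos hMpos]
  · have hN : 3 ≤ N := by omega
    set L : Int := N / 2 with hLdef
    have hL0 : (1 : Int) ≤ L := by omega
    have hLN : L ≤ N := by omega
    rw [hfd]
    -- A's loop: each term is C(N,i)² % MOD
    have hcongr :
        (PySem.List.pyRange (L + 1) (N + 1) 1).foldl
          (fun totalpaths i =>
            totalpaths + PySem.Int.mod (nCrA N i * nCrA (i + min (i - 1) (N - i)) i) pvMOD) 0
        = (PySem.List.pyRange (L + 1) (N + 1) 1).foldl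
          (fun totalpaths i => totalpaths + PySem.Int.mod (pvC N i * pvC N i) pvMOD) 0 := by
      apply PySem.List.foldl_congr_mem
      intro acc x hx
      rw [PySem.List.mem_pyRange_one] at hx
      have hmin : min (x - 1) (N - x) = N - x := by
        apply min_eq_right; omega
      rw [hmin, (by ring : x + (N - x) = N),
        pv_nCrA_eq N x (by omega) (by omega)]
    rw [hcongr, PySem.List.foldl_add]
    -- B's loop via the invariant
    have hb := pv_bloop N L (by omega) (N - L).toNat N rfl hLN le_rfl 0 (by
      rw [PySem.Int.mod_eq_emod_of_pos hMpos]; simp)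
    have hCNN : pvC N N = 1 := by simp [pvC]
    rw [hCNN] at hb
    rw [hb, PySem.List.pyRange_neg_one_eq_reverse, List.map_reverse, List.sum_reverse]
    simp only [PySem.Int.mod_eq_emod_of_pos hMpos, zero_add]
    conv_rhs => rw [List.sum_int_mod]
    rw [List.map_map]
    simp only [Function.comp_def]
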